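-- pv_equiv track=rewrite | github.com/rahulprajapati23/SEM_05_CYBER-SECURITY | Algorithm Analysis & Design/SOURCE_CODES/Practical1_2.py | func
-- ===== SOURCE A (Python) =====
-- def func(arr,n):
--     min_num = float('inf')
--     main = []
--     for i in range(0, n):
--         for j in range(i + 1, n):
--             num = arr[i] + arr[j]
--             abs_val = abs(num)
--             if abs_val==min_num:
--                 main.append([arr[i], arr[j]])
--             elif abs_val < min_num:
--                 main.clear()
--                 min_num = abs_val
--                 main = [[arr[i], arr[j]]]
--     return main
-- ===== SOURCE B (Python) =====
-- def func(arr, n):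
--     m = min((abs(arr[i] + arr[j]) for i in range(0, n) for j in range(i + 1, n)),
--             default=None)
--     if m is None:
--         return []
--     return [[arr[i], arr[j]]
--             for i in range(0, n) for j in range(i + 1, n)
--             if abs(arr[i] + arr[j]) == m]
-- ===== Notes on version B (the rewrite author's own statement) =====
-- stated objective: simpler
-- what changed: B replaces A's stateful single pass (running minimum with clear-and-restart of the result list) by two independent passes over the pair list: compute the global minimum absolute sum with min(), then collect the matching pairs with a filter comprehension.
import Mathlib
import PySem

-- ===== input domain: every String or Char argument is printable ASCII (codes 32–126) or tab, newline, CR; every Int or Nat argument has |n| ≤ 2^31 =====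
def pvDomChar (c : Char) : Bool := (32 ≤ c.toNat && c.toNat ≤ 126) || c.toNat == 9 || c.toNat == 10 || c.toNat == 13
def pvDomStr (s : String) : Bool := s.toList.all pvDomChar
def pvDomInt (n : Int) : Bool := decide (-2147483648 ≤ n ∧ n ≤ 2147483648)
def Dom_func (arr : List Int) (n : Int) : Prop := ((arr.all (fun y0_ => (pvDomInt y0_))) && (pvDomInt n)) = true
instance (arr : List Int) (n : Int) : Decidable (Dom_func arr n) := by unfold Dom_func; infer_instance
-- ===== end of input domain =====

-- B replaces A's stateful single pass (running minimum with clear-and-restart of the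
-- result list) by two passes: compute the global minimum |sum| with min(), then filter;
-- objective: simpler (same O(n^2) cost).

-- ===== PORT A =====
-- A's running minimum starts at float('inf'); modelled as `none` (no pair seen yet).
def func (arr : List Int) (n : Int) : List (List Int) :=
  let res := (PySem.List.pyRange 0 n 1).foldl (fun st i =>
    (PySem.List.pyRange (i + 1) n 1).foldl (fun st j =>
      let num := PySem.List.pyGetD arr i 0 + PySem.List.pyGetD arr j 0
      let abs_val := |num|
      match st with
      | (none, _) => (some abs_val, [[PySem.List.pyGetD arr i 0, PySem.List.pyGetD arr j 0]])
      | (some min_num, main) =>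
        if abs_val = min_num then
          (some min_num, main ++ [[PySem.List.pyGetD arr i 0, PySem.List.pyGetD arr j 0]])
        else if abs_val < min_num then
          (some abs_val, [[PySem.List.pyGetD arr i 0, PySem.List.pyGetD arr j 0]])
        else (some min_num, main)) st)
    ((none : Option Int), ([] : List (List Int)))
  res.2

-- ===== PORT B =====
def func_alt (arr : List Int) (n : Int) : List (List Int) :=
  -- min(generator, default=None): Option-valued first pass over the abs sums
  match PySem.List.min? ((PySem.List.pyRange 0 n 1).flatMap (fun i =>
      (PySem.List.pyRange (i + 1) n 1).map (fun j =>
        |PySem.List.pyGetD arr i 0 + PySem.List.pyGetD arr j 0|))) (fun x => x) with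
  | none => []
  | some m =>
    (PySem.List.pyRange 0 n 1).flatMap (fun i =>
      ((PySem.List.pyRange (i + 1) n 1).filter (fun j =>
          |PySem.List.pyGetD arr i 0 + PySem.List.pyGetD arr j 0| == m)).map (fun j =>
        [PySem.List.pyGetD arr i 0, PySem.List.pyGetD arr j 0]))

-- ===== PRECONDITION & SPEC =====
-- Pre_: exactly the inputs where A returns (no IndexError): either every visited index
-- is in range (n ≤ len(arr)), or no element is ever accessed (n ≤ 1).
def Pre_func (arr : List Int) (n : Int) : Prop := n ≤ PySem.List.len arr ∨ n ≤ 1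
instance (arr : List Int) (n : Int) : Decidable (Pre_func arr n) := by unfold Pre_func; infer_instance
def pvWitness_func : List Int × Int := ([1, -2, 3, 2], 4)
def Spec_func (arr : List Int) (n : Int) (out : List (List Int)) : Prop := out = func_alt arr n
instance (arr : List Int) (n : Int) (out : List (List Int)) : Decidable (Spec_func arr n out) := by unfold Spec_func; infer_instance

-- ===== CLAIM (what is proved, stated in full; the proofs are below) =====
def Claim_equal_func : Prop := ∀ (arr : List Int) (n : Int), Dom_func arr n → Pre_func arr n → Spec_func arr n (func arr n)

-- ===== LEMMAS AND PROOFS =====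

-- absolute pair sum
def pvF (p : Int × Int) : Int := |p.1 + p.2|

-- A's loop body, on a pair
def pvStep (st : Option Int × List (List Int)) (p : Int × Int) : Option Int × List (List Int) :=
  match st with
  | (none, _) => (some (pvF p), [[p.1, p.2]])
  | (some m, acc) =>
    if pvF p = m then (some m, acc ++ [[p.1, p.2]])
    else if pvF p < m then (some (pvF p), [[p.1, p.2]])
    else (some m, acc)

-- the flattened pair list both ports traverse
def pvPairs (arr : List Int) (n : Int) : List (Int × Int) :=
  (PySem.List.pyRange 0 n 1).flatMap (fun i =>
    (PySem.List.pyRange (i + 1) n 1).map (fun j =>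
      (PySem.List.pyGetD arr i 0, PySem.List.pyGetD arr j 0)))

lemma func_eq_foldl (arr : List Int) (n : Int) :
    func arr n = ((pvPairs arr n).foldl pvStep (none, [])).2 := by
  unfold func pvPairs
  rw [List.foldl_flatMap]
  refine congrArg Prod.snd ?_
  refine PySem.List.foldl_congr_mem _ _ _ _ ?_
  intro acc i _
  rw [List.foldl_map]
  refine PySem.List.foldl_congr_mem _ _ _ _ ?_
  intro st j _
  rcases acc with ⟨_ | m, main⟩ <;> simp only [pvStep, pvF]

-- the running minimum never exceeds its start value
lemma pvFoldl_min_le (t : List (Int × Int)) (a : Int) :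
    t.foldl (fun x p => min x (pvF p)) a ≤ a := by
  induction t generalizing a with
  | nil => simp
  | cons p t ih => exact le_trans (ih (min a (pvF p))) (by omega)

-- invariant of A's loop once the minimum is a real value
lemma pvFoldl_some (l : List (Int × Int)) (m : Int) (acc : List (List Int)) :
    l.foldl pvStep (some m, acc) =
      (some (l.foldl (fun x p => min x (pvF p)) m),
       (if l.foldl (fun x p => min x (pvF p)) m = m then acc else []) ++
         (l.filter (fun p => pvF p == l.foldl (fun x p => min x (pvF p)) m)).map
           (fun p => [p.1, p.2])) := by
  induction l generalizing m acc with
  | nil => simp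
  | cons p t ih =>
    simp only [List.foldl_cons, List.filter_cons]
    rcases lt_trichotomy (pvF p) m with hlt | heq | hgt
    · have h1 : min m (pvF p) = pvF p := by omega
      have h2 : pvStep (some m, acc) p = (some (pvF p), [[p.1, p.2]]) := by
        simp [pvStep, hlt.ne, hlt]
      simp only [h1]
      rw [h2, ih]
      have hmin := pvFoldl_min_le t (pvF p)
      have hne : (t.foldl (fun x q => min x (pvF q)) (pvF p) = m) = False := by
        simp only [eq_iff_iff, iff_false]; omega
      simp only [hne, if_false]
      by_cases h3 : t.foldl (fun x q => min x (pvF q)) (pvF p) = pvF p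
      · simp [h3]
      · have h4 : (pvF p == t.foldl (fun x q => min x (pvF q)) (pvF p)) = false := by
          simp; omega
        simp [h3, h4]
    · have h1 : min m (pvF p) = m := by omega
      have h2 : pvStep (some m, acc) p = (some m, acc ++ [[p.1, p.2]]) := by
        simp [pvStep, heq]
      simp only [h1]
      rw [h2, ih]
      by_cases h3 : t.foldl (fun x q => min x (pvF q)) m = m
      · simp [h3, heq]
      · have hmin := pvFoldl_min_le t m
        have h4 : (pvF p == t.foldl (fun x q => min x (pvF q)) m) = false := by
          simp [heq]; omega
        simp [h3, h4]
    · have h1 : min m (pvF p) = m := by omega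
      have h2 : pvStep (some m, acc) p = (some m, acc) := by
        simp [pvStep, hgt.ne', (show ¬ pvF p < m by omega)]
      simp only [h1]
      rw [h2, ih]
      have hmin := pvFoldl_min_le t m
      have h4 : (pvF p == t.foldl (fun x q => min x (pvF q)) m) = false := by
        simp; omega
      simp [h4]

lemma func_alt_eq (arr : List Int) (n : Int) :
    func_alt arr n =
      match PySem.List.min? ((pvPairs arr n).map pvF) (fun x => x) with
      | none => []
      | some m => ((pvPairs arr n).filter (fun p => pvF p == m)).map (fun p => [p.1, p.2]) := by
  unfold func_alt pvPairs
  have h1 : ((PySem.List.pyRange 0 n 1).flatMap (fun i =>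
        (PySem.List.pyRange (i + 1) n 1).map (fun j =>
          |PySem.List.pyGetD arr i 0 + PySem.List.pyGetD arr j 0|)))
      = ((PySem.List.pyRange 0 n 1).flatMap (fun i =>
        (PySem.List.pyRange (i + 1) n 1).map (fun j =>
          (PySem.List.pyGetD arr i 0, PySem.List.pyGetD arr j 0)))).map pvF := by
    rw [List.map_flatMap]
    simp only [List.map_map]
    rfl
  rw [h1]
  cases hmm : PySem.List.min? (((PySem.List.pyRange 0 n 1).flatMap (fun i =>
      (PySem.List.pyRange (i + 1) n 1).map (fun j =>
        (PySem.List.pyGetD arr i 0, PySem.List.pyGetD arr j 0)))).map pvF) (fun x => x) with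
  | none => rfl
  | some m =>
    dsimp only
    rw [List.filter_flatMap, List.map_flatMap]
    simp only [List.filter_map, List.map_map]
    rfl

-- ===== VERDICT (by name: the statement is the Claim_ definition above) =====
theorem func_spec : Claim_equal_func := by
  intro arr n _ _
  unfold Spec_func
  rw [func_eq_foldl, func_alt_eq]
  cases hp : pvPairs arr n with
  | nil => simp [PySem.List.min?]
  | cons p t =>
    rw [List.map_cons, PySem.List.min?_id_cons, List.foldl_map]
    have h0 : pvStep (none, ([] : List (List Int))) p = (some (pvF p), [[p.1, p.2]]) := rfl
    rw [List.foldl_cons, h0, pvFoldl_some]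
    simp only [List.filter_cons]
    by_cases h3 : t.foldl (fun x q => min x (pvF q)) (pvF p) = pvF p
    · simp [h3]
    · have : ¬ (pvF p == t.foldl (fun x q => min x (pvF q)) (pvF p)) = true := by
        simp; omega
      simp [h3, this]
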